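-- pv_equiv track=rewrite | github.com/michaeltaranik/algos | selection_algo.py | better_algo_x_190
-- ===== SOURCE A (Python) =====
-- def better_algo_x_190(arr):
--     i = 0
--     j = 1
--     current = 0
--     maximum = current
--     while j < len(arr):
--         if arr[j - 1] <= arr[j]:
--             current = arr[j] - arr[i]
--             j += 1
--         else:
--             i = j
--             j = i + 1
--
--         maximum = max(current, maximum)
--
--     return maximum
-- ===== SOURCE B (Python) =====
-- def better_algo_x_190(arr):
--     # Partition arr into maximal non-decreasing runs, then take the largest
--     # (last - first) over the runs (0 if there are none).
--     runs = []
--     cur = []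
--     for x in arr:
--         if cur and cur[-1] > x:
--             runs.append(cur)
--             cur = [x]
--         else:
--             cur.append(x)
--     if cur:
--         runs.append(cur)
--     return max((r[-1] - r[0] for r in runs), default=0)
-- ===== Notes on version B (the rewrite author's own statement) =====
-- stated objective: alternative
-- what changed: Replaces A's interleaved two-pointer index scan (i tracking the run start, j sliding, max folded into the same loop) by an explicit partition of the array into maximal non-decreasing runs followed by a separate reduce taking the maximum of (last - first) over the runs.
import Mathlib
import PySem

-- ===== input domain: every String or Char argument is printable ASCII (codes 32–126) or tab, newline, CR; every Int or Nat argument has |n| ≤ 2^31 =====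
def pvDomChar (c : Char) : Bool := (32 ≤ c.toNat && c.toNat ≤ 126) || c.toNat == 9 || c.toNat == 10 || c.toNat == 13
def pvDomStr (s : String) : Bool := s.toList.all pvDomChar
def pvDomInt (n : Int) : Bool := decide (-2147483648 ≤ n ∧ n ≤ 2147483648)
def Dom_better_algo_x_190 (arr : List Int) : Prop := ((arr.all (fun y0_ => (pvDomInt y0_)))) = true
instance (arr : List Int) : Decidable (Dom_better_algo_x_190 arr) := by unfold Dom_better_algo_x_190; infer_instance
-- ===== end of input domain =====

-- B replaces A's interleaved two-pointer index scan by an explicit partition of the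
-- array into maximal non-decreasing runs followed by a separate max-reduce over
-- the runs' (last - first) differences (objective: alternative decomposition).


-- ===== PORT A =====
-- A's while-loop: j advances by exactly 1 in both branches; ported as the obvious
-- recursion on j with the same state (i, current, maximum).  All indices read
-- (j-1, j, i) are always in range, so List.getD is exact here.
def pvALoop (arr : List Int) (i j : Nat) (current maximum : Int) : Int :=
  if _h : j < arr.length then
    if arr.getD (j - 1) 0 ≤ arr.getD j 0 then
      pvALoop arr i (j + 1) (arr.getD j 0 - arr.getD i 0)
        (max (arr.getD j 0 - arr.getD i 0) maximum)
    else
      pvALoop arr j (j + 1) current (max current maximum)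
  else maximum
termination_by arr.length - j

def better_algo_x_190 (arr : List Int) : Int :=
  pvALoop arr 0 1 0 0

-- ===== PORT B =====
-- one loop step of Source B: push the finished run and start a new one, or extend
def pvBStep (st : List (List Int) × List Int) (x : Int) : List (List Int) × List Int :=
  let (runs, cur) := st
  if cur ≠ [] ∧ x < cur.getLastD 0 then (runs ++ [cur], [x]) else (runs, cur ++ [x])

def better_algo_x_190_alt (arr : List Int) : Int :=
  let st := arr.foldl pvBStep ([], [])
  let runs := if st.2 ≠ [] then st.1 ++ [st.2] else st.1
  (PySem.List.max? (runs.map (fun r => r.getLastD 0 - r.headD 0)) (fun y => y)).getD 0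

-- ===== PRECONDITION & SPEC =====
def Spec_better_algo_x_190 (arr : List Int) (out : Int) : Prop := out = better_algo_x_190_alt arr
instance (arr : List Int) (out : Int) : Decidable (Spec_better_algo_x_190 arr out) := by unfold Spec_better_algo_x_190; infer_instance

-- ===== CLAIM (what is proved, stated in full; the proofs are below) =====
def Claim_equal_better_algo_x_190 : Prop := ∀ (arr : List Int), Dom_better_algo_x_190 arr → Spec_better_algo_x_190 arr (better_algo_x_190 arr)

-- ===== LEMMAS AND PROOFS =====

-- common specification: scan with prev value, current run start, best difference
def specRun (prev s best : Int) : List Int → Int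
  | [] => best
  | x :: xs => if prev ≤ x then specRun x s (max (x - s) best) xs else specRun x x best xs

-- proof-side names for B's pieces
def pvDiff (r : List Int) : Int := r.getLastD 0 - r.headD 0
def pvM (runs : List (List Int)) : Int := (runs.map pvDiff).foldl max 0
def pvFinish (st : List (List Int) × List Int) : List (List Int) :=
  if st.2 ≠ [] then st.1 ++ [st.2] else st.1
def pvGood (r : List Int) : Prop := r.headD 0 ≤ r.getLastD 0

theorem specRun_max (xs : List Int) : ∀ p s a b,
    specRun p s (max a b) xs = max a (specRun p s b xs) := by
  induction xs with
  | nil => intro p s a b; simp [specRun]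
  | cons x xs ih =>
    intro p s a b
    simp only [specRun]
    split
    · rw [show max (x - s) (max a b) = max a (max (x - s) b) by omega]
      exact ih x s a _
    · exact ih x x a b

theorem specRun_le (xs : List Int) : ∀ p s b, b ≤ specRun p s b xs := by
  induction xs with
  | nil => intro p s b; simp [specRun]
  | cons x xs ih =>
    intro p s b
    simp only [specRun]
    split
    · exact le_trans (le_max_right _ _) (ih x s _)
    · exact ih x x b

theorem pvALoop_eq (arr : List Int) : ∀ k j i cur maxi,
    arr.length - j ≤ k → 0 < j → i < j → cur ≤ maxi →
    pvALoop arr i j cur maxi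
      = specRun (arr.getD (j - 1) 0) (arr.getD i 0) maxi (arr.drop j) := by
  intro k
  induction k with
  | zero =>
    intro j i cur maxi hk _ _ _
    have hj : ¬ j < arr.length := by omega
    rw [pvALoop]
    simp [hj, List.drop_eq_nil_of_le (by omega : arr.length ≤ j), specRun]
  | succ k ih =>
    intro j i cur maxi hk hj0 hij hcm
    by_cases hj : j < arr.length
    · have hdrop : arr.drop j = arr.getD j 0 :: arr.drop (j + 1) := by
        rw [List.getD_eq_getElem _ _ hj, List.drop_eq_getElem_cons hj]
      rw [pvALoop]
      simp only [hj, dif_pos]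
      rw [hdrop]
      by_cases hle : arr.getD (j - 1) 0 ≤ arr.getD j 0
      · rw [if_pos hle]
        simp only [specRun, if_pos hle]
        rw [ih (j + 1) i _ _ (by omega) (by omega) (by omega) (le_max_left _ _)]
        simp
      · rw [if_neg hle]
        simp only [specRun, if_neg hle]
        rw [ih (j + 1) j _ _ (by omega) (by omega) (by omega) (le_max_left _ _)]
        simp [max_eq_right hcm]
    · rw [pvALoop]
      simp [hj, List.drop_eq_nil_of_le (by omega : arr.length ≤ j), specRun]

theorem pvM_append (runs : List (List Int)) (c : List Int) :
    pvM (runs ++ [c]) = max (pvM runs) (pvDiff c) := by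
  simp [pvM]

-- the B-side fold, related to specRun (current run carried as a :: t, last value l)
theorem pvBFold_eq (xs : List Int) : ∀ (runs : List (List Int)) (a : Int) (t : List Int) (l : Int),
    (a :: t).getLastD 0 = l → a ≤ l →
    pvM (pvFinish (xs.foldl pvBStep (runs, a :: t)))
      = max (pvM runs) (specRun l a (l - a) xs) := by
  induction xs with
  | nil =>
    intro runs a t l hl hal
    rw [List.getLastD_eq_getLast?] at hl
    have : pvFinish (runs, a :: t) = runs ++ [a :: t] := by simp [pvFinish]
    rw [List.foldl_nil, this, pvM_append]
    simp [pvDiff, hl, specRun]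
  | cons x xs ih =>
    intro runs a t l hl hal
    rw [List.foldl_cons]
    by_cases hx : x < l
    · -- run breaks: push (a :: t), start [x]
      have hstep : pvBStep (runs, a :: t) x = (runs ++ [a :: t], [x]) := by
        simp [pvBStep, List.getLastD_eq_getLast?]
        rw [List.getLastD_eq_getLast?] at hl
        omega
      rw [hstep, ih (runs ++ [a :: t]) x [] x (by simp) le_rfl]
      simp only [specRun, if_neg (by omega : ¬ l ≤ x), sub_self]
      rw [show (l - a : Int) = max (l - a) 0 by omega, specRun_max]
      rw [pvM_append]
      simp only [pvDiff, hl, List.headD_cons]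
      rw [max_assoc]
    · -- run continues: cur := cur ++ [x]
      have hstep : pvBStep (runs, a :: t) x = (runs, a :: (t ++ [x])) := by
        simp only [pvBStep]
        rw [if_neg (by
          simp only [ne_eq, not_and, not_lt]
          intro _
          rw [hl]
          omega)]
        rfl
      have hlast : (a :: (t ++ [x])).getLastD 0 = x := by
        rw [show a :: (t ++ [x]) = (a :: t) ++ [x] by simp]
        exact List.getLastD_concat
      rw [hstep, ih runs a (t ++ [x]) x hlast (by omega)]
      simp only [specRun, if_pos (by omega : l ≤ x)]
      rw [show max (x - a) (l - a) = x - a by omega]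

-- every run produced by the fold has first ≤ last, i.e. diff ≥ 0
theorem pvBFold_good (xs : List Int) : ∀ (runs : List (List Int)) (a : Int) (t : List Int),
    (∀ r ∈ runs, pvGood r) → pvGood (a :: t) →
    ∀ r ∈ pvFinish (xs.foldl pvBStep (runs, a :: t)), pvGood r := by
  induction xs with
  | nil =>
    intro runs a t h1 h2 r hr
    have : pvFinish (runs, a :: t) = runs ++ [a :: t] := by simp [pvFinish]
    rw [List.foldl_nil, this] at hr
    rcases List.mem_append.1 hr with h | h
    · exact h1 r h
    · simp at h; subst h; exact h2
  | cons x xs ih =>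
    intro runs a t h1 h2
    rw [List.foldl_cons]
    by_cases hx : x < (a :: t).getLastD 0
    · have hstep : pvBStep (runs, a :: t) x = (runs ++ [a :: t], [x]) := by
        rw [List.getLastD_eq_getLast?] at hx
        simp [pvBStep, List.getLastD_eq_getLast?, hx]
      rw [hstep]
      refine ih _ _ _ ?_ (by simp [pvGood])
      intro r hr
      rcases List.mem_append.1 hr with h | h
      · exact h1 r h
      · simp at h; subst h; exact h2
    · have hstep : pvBStep (runs, a :: t) x = (runs, a :: (t ++ [x])) := by
        simp only [pvBStep]
        rw [if_neg (by
          rw [List.getLastD_eq_getLast?] at hx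
          simp only [ne_eq, not_and, not_lt]
          intro _
          rw [List.getLastD_eq_getLast?]
          omega)]
        rfl
      rw [hstep]
      refine ih _ _ _ h1 ?_
      have hlast : (a :: (t ++ [x])).getLastD 0 = x := by
        rw [show a :: (t ++ [x]) = (a :: t) ++ [x] by simp]
        exact List.getLastD_concat
      unfold pvGood at h2 ⊢
      rw [hlast]
      simp only [List.headD_cons] at h2 ⊢
      omega

theorem max_getD_nonneg (ds : List Int) (h : ∀ d ∈ ds, 0 ≤ d) :
    (PySem.List.max? ds (fun y => y)).getD 0 = ds.foldl max 0 := by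
  cases ds with
  | nil => simp [PySem.List.max?]
  | cons d t =>
    rw [PySem.List.max?_id_cons]
    simp only [Option.getD_some, List.foldl_cons]
    rw [max_eq_right (h d (by simp))]

-- ===== VERDICT (by name: the statement is the Claim_ definition above) =====
theorem better_algo_x_190_spec : Claim_equal_better_algo_x_190 := by
  intro arr _
  unfold Spec_better_algo_x_190
  cases arr with
  | nil =>
    unfold better_algo_x_190 better_algo_x_190_alt
    rw [pvALoop]
    simp [PySem.List.max?]
  | cons a t =>
    have hA : better_algo_x_190 (a :: t) = specRun a a 0 t := by
      unfold better_algo_x_190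
      rw [pvALoop_eq (a :: t) ((a :: t).length) 1 0 0 0 (by omega) (by omega) (by omega) le_rfl]
      simp
    have hstep : pvBStep ([], []) a = ([], [a]) := by simp [pvBStep]
    have hB : better_algo_x_190_alt (a :: t) = max 0 (specRun a a 0 t) := by
      unfold better_algo_x_190_alt
      simp only [List.foldl_cons, hstep]
      have hfin : ∀ st : List (List Int) × List Int,
          (if st.2 ≠ [] then st.1 ++ [st.2] else st.1) = pvFinish st := fun st => rfl
      have hdif : (fun r : List Int => r.getLastD 0 - r.headD 0) = pvDiff := rfl
      rw [hfin, hdif, max_getD_nonneg]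
      · have := pvBFold_eq t [] a [] a (by simp) le_rfl
        rw [show (a - a : Int) = 0 by omega] at this
        rw [← pvM, this]
        simp [pvM]
      · intro d hd
        simp only [List.mem_map] at hd
        obtain ⟨r, hr, rfl⟩ := hd
        have hg : pvGood r := pvBFold_good t [] a [] (by simp) (by simp [pvGood]) r hr
        unfold pvGood at hg
        unfold pvDiff
        omega
    rw [hA, hB, max_eq_right (specRun_le t a a 0)]
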